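-- pv_equiv track=rewrite | github.com/stevenshan-dev/puzzle | gerry.py | getFinalDistrict
-- ===== SOURCE A (Python) =====
-- def getFinalDistrict(district, final, merges):
-- 	if district not in merges:
-- 		return district
-- 	if district in final:
-- 		return final[district]
-- 	temp = getFinalDistrict(merges[district], final, merges)
-- 	final[district] = temp
-- 	return temp
-- ===== SOURCE B (Python) =====
-- def getFinalDistrict(district, final, merges):
--     node = district
--     path = []
--     while node in merges and node not in final:
--         path.append(node)
--         node = merges[node]
--     result = node if node not in merges else final[node]
--     for p in reversed(path):
--         final[p] = result
--     return result
-- ===== Notes on version B (the rewrite author's own statement) =====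
-- stated objective: alternative
-- what changed: Replaces A's memoized recursion with an iterative while-loop that follows the merge chain, collects the visited path, and writes the memo entries back in one pass at the end.
import Mathlib
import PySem

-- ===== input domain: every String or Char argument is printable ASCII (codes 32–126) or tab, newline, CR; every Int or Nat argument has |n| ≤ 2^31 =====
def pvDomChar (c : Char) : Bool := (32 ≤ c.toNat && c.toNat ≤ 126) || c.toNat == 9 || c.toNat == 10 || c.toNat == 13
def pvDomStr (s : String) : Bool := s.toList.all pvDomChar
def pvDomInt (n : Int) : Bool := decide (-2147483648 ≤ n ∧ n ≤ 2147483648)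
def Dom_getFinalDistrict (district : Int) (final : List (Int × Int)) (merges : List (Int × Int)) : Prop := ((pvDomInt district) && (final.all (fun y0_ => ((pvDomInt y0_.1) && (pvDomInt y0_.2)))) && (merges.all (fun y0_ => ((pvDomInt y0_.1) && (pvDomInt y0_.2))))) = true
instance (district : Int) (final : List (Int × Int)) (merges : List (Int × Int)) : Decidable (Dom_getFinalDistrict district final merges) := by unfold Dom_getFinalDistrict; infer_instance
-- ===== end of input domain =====

-- B replaces A's memoized recursion by an iterative chain walk with a write-back pass; A mutates
-- `final` in place (memoization) and B performs the same writes — the theorems here are about the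
-- RETURN value only. A raises RecursionError on cyclic merge chains; Pre_ excludes those inputs.

-- ===== PORT A =====
-- Fuel only makes A's (chain-following) recursion total; Pre_ guarantees it is never exhausted.
-- Python `merges[district]` cannot raise here since the `none` branch already returned.
def goA (fuel : Nat) (district : Int) (final merges : List (Int × Int)) : Int × List (Int × Int) :=
  match fuel with
  | 0 => (district, final)          -- unreachable under Pre_
  | fuel + 1 =>
    match merges.lookup district with
    | none => (district, final)                 -- if district not in merges: return district
    | some nxt =>
      match final.lookup district with
      | some v => (v, final)                    -- if district in final: return final[district]
      | none =>
        let r := goA fuel nxt final merges      -- temp = getFinalDistrict(merges[district], ...)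
        (r.1, r.2 ++ [(district, r.1)])         -- final[district] = temp; return temp

def getFinalDistrict (district : Int) (final : List (Int × Int)) (merges : List (Int × Int)) : Int :=
  (goA (merges.length + 1) district final merges).1

-- ===== PORT B =====
-- the iterative walk; `path` is Source B's visited list (used there only for write-back into `final`)
def goB (fuel : Nat) (node : Int) (final merges : List (Int × Int)) (path : List Int) : Int × List Int :=
  match fuel with
  | 0 => (node, path)               -- unreachable under Pre_
  | fuel + 1 =>
    if ((merges.lookup node).isSome && (final.lookup node).isNone) then
      goB fuel ((merges.lookup node).getD node) final merges (path ++ [node])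
    else (node, path)

def getFinalDistrict_alt (district : Int) (final : List (Int × Int)) (merges : List (Int × Int)) : Int :=
  let r := goB (merges.length + 1) district final merges []
  -- Source B's write-back loop over r.2 mutates `final` only and does not affect the returned value
  if (merges.lookup r.1) = none then r.1 else ((final.lookup r.1).getD r.1)

-- ===== PRECONDITION & SPEC =====
def pvStep (merges : List (Int × Int)) (d : Int) : Int := (merges.lookup d).getD d
def pvStop (final merges : List (Int × Int)) (d : Int) : Bool :=
  (merges.lookup d).isNone || (final.lookup d).isSome

-- Pre_ excludes exactly the inputs whose merge chain never terminates (a cycle in `merges` reached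
-- from `district`), on which Python A raises RecursionError.
def Pre_getFinalDistrict (district : Int) (final : List (Int × Int)) (merges : List (Int × Int)) : Prop :=
  ∃ k ∈ Finset.range (merges.length + 1), pvStop final merges ((pvStep merges)^[k] district) = true
instance (district : Int) (final : List (Int × Int)) (merges : List (Int × Int)) : Decidable (Pre_getFinalDistrict district final merges) := by unfold Pre_getFinalDistrict; infer_instance

def pvWitness_getFinalDistrict : Int × (List (Int × Int)) × (List (Int × Int)) := (1, [], [(1, 2)])

def Spec_getFinalDistrict (district : Int) (final : List (Int × Int)) (merges : List (Int × Int)) (out : Int) : Prop := out = getFinalDistrict_alt district final merges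
instance (district : Int) (final : List (Int × Int)) (merges : List (Int × Int)) (out : Int) : Decidable (Spec_getFinalDistrict district final merges out) := by unfold Spec_getFinalDistrict; infer_instance

-- ===== CLAIM (what is proved, stated in full; the proofs are below) =====
def Claim_equal_getFinalDistrict : Prop := ∀ (district : Int) (final : List (Int × Int)) (merges : List (Int × Int)), Dom_getFinalDistrict district final merges → Pre_getFinalDistrict district final merges → Spec_getFinalDistrict district final merges (getFinalDistrict district final merges)

-- ===== LEMMAS AND PROOFS =====

-- main invariant: with enough fuel to reach a stopping node, A's recursion and B's walk agree
lemma goA_eq_goB (fuel : Nat) : ∀ (d : Int) (final merges : List (Int × Int)) (path : List Int),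
    (∃ k, k < fuel ∧ pvStop final merges ((pvStep merges)^[k] d) = true) →
    (goA fuel d final merges).1 =
      (let r := goB fuel d final merges path
       if (merges.lookup r.1) = none then r.1 else ((final.lookup r.1).getD r.1)) := by
  induction fuel with
  | zero =>
    intro d final merges path h
    obtain ⟨k, hk, _⟩ := h
    omega
  | succ fuel ih =>
    intro d final merges path h
    obtain ⟨k, hk, hstop⟩ := h
    by_cases hm : merges.lookup d = none
    · simp [goA, goB, hm]
    · obtain ⟨nxt, hnxt⟩ := Option.ne_none_iff_exists'.mp hm
      by_cases hf : (final.lookup d).isSome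
      · obtain ⟨v, hv⟩ := Option.isSome_iff_exists.mp hf
        simp [goA, goB, hnxt, hv]
      · -- recursive / looping case: d is not a stopping node, so k = j + 1
        have hstep : pvStep merges d = nxt := by simp [pvStep, hnxt]
        have hk0 : k ≠ 0 := by
          intro h0
          subst h0
          simp [pvStop, hnxt, hf] at hstop
        obtain ⟨j, rfl⟩ := Nat.exists_eq_succ_of_ne_zero hk0
        have hrec : ∃ k', k' < fuel ∧ pvStop final merges ((pvStep merges)^[k'] nxt) = true := by
          refine ⟨j, by omega, ?_⟩
          rw [← hstep, ← Function.iterate_succ_apply]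
          exact hstop
        have hfn : final.lookup d = none := Option.not_isSome_iff_eq_none.mp hf
        have := ih nxt final merges (path ++ [d]) hrec
        simp only [goA, goB, hnxt, hfn, Option.isSome_some, Option.isNone_none, Bool.and_true,
          if_pos, Option.getD_some]
        simpa [hstep] using this

-- ===== VERDICT (by name: the statement is the Claim_ definition above) =====
theorem getFinalDistrict_spec : Claim_equal_getFinalDistrict := by
  intro district final merges _ hpre
  obtain ⟨k, hk, hstop⟩ := hpre
  simp only [Finset.mem_range] at hk
  unfold Spec_getFinalDistrict getFinalDistrict getFinalDistrict_alt
  exact goA_eq_goB (merges.length + 1) district final merges [] ⟨k, hk, hstop⟩
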